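-- pv_equiv track=rewrite | github.com/dertwist/Source2Utilities | Source2Utilities/utils.py | increment_suffix
-- ===== SOURCE A (Python) =====
-- def increment_suffix(suffix):
--     """Increment an alphabetic suffix (e.g., 'a' becomes 'b'; 'z' becomes 'aa')."""
--     if not suffix or not suffix.isalpha():
--         return 'a'
--     last_char = suffix[-1]
--     rest = suffix[:-1]
--     if last_char == 'z':
--         return (increment_suffix(rest) + 'a') if rest else 'aa'
--     return rest + chr(ord(last_char) + 1)
-- ===== SOURCE B (Python) =====
-- def increment_suffix(suffix):
--     """Increment an alphabetic suffix (e.g., 'a' becomes 'b'; 'z' becomes 'aa')."""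
--     if not suffix or not suffix.isalpha():
--         return 'a'
--     chars = list(suffix)
--     i = len(chars) - 1
--     while i >= 0 and chars[i] == 'z':
--         chars[i] = 'a'
--         i -= 1
--     if i < 0:
--         return 'a' + ''.join(chars)
--     chars[i] = chr(ord(chars[i]) + 1)
--     return ''.join(chars)
-- ===== Notes on version B (the rewrite author's own statement) =====
-- stated objective: alternative
-- what changed: Replaces A's right-recursion with string slicing and concatenation at every level by a single iterative right-to-left scan over a char array that rewrites the trailing run of carry characters in place and bumps the first earlier character.
import Mathlib
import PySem

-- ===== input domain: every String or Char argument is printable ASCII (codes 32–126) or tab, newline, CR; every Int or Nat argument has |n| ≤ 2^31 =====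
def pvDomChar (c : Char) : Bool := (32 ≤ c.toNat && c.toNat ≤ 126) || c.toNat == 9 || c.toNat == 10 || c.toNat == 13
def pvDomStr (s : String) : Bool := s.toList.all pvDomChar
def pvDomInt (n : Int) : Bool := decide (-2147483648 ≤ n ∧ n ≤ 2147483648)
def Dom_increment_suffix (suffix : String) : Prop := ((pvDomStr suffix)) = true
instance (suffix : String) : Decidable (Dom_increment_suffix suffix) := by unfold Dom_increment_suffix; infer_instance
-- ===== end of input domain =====

-- B replaces A's right-recursion (with slicing/concatenation at every level) by one iterative
-- right-to-left in-place scan; alternative decomposition, same results.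


-- ===== PORT A =====
-- A's recursion, on the string's char list (strings are carried as their char lists).
def pvIncA (l : List Char) : List Char :=
  if l = [] ∨ ¬ PySem.Chars.strIsalpha l then ['a']
  else
    let last_char := (PySem.List.pyGet? l (-1)).getD 'a'
    let rest := PySem.List.slice l none (some (-1))
    if last_char = 'z' then
      if rest ≠ [] then pvIncA rest ++ ['a'] else ['a', 'a']
    else rest ++ [Char.ofNat (last_char.toNat + 1)]
termination_by l.length
decreasing_by
  simp only [PySem.List.slice_to_neg_one]
  have : l ≠ [] := by tauto
  have := List.length_pos_of_ne_nil this
  simp [List.length_dropLast]; omega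

def increment_suffix (suffix : String) : String := String.mk (pvIncA suffix.toList)

-- ===== PORT B =====
-- Source B's while loop: k = i + 1 (k = 0 ⇔ the index fell off the left end).
def pvBScan (chars : List Char) : Nat → List Char
  | 0 => 'a' :: chars
  | j + 1 =>
    if chars.getD j 'a' = 'z' then pvBScan (chars.set j 'a') j
    else chars.set j (Char.ofNat ((chars.getD j 'a').toNat + 1))

def increment_suffix_alt (suffix : String) : String :=
  if suffix.toList = [] ∨ ¬ PySem.Str.strIsalpha suffix then "a"
  else String.mk (pvBScan suffix.toList suffix.toList.length)

-- ===== PRECONDITION & SPEC =====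
def Spec_increment_suffix (suffix : String) (out : String) : Prop := out = increment_suffix_alt suffix
instance (suffix : String) (out : String) : Decidable (Spec_increment_suffix suffix out) := by unfold Spec_increment_suffix; infer_instance

-- ===== CLAIM (what is proved, stated in full; the proofs are below) =====
def Claim_equal_increment_suffix : Prop := ∀ (suffix : String), Dom_increment_suffix suffix → Spec_increment_suffix suffix (increment_suffix suffix)

-- ===== LEMMAS AND PROOFS =====
lemma pvBScan_append (k : Nat) : ∀ (l t : List Char), k ≤ l.length →
    pvBScan (l ++ t) k = pvBScan l k ++ t := by
  induction k with
  | zero => intro l t _; simp [pvBScan]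
  | succ j ih =>
    intro l t hk
    have hj : j < l.length := by omega
    have hget : (l ++ t)[j]? = l[j]? := List.getElem?_append_left hj
    have hset : ∀ c, (l ++ t).set j c = l.set j c ++ t := by
      intro c; simp [List.set_append, Nat.not_le.mpr hj]
    rw [pvBScan, pvBScan]
    simp only [List.getD, hget]
    by_cases hz : l[j]?.getD 'a' = 'z'
    · rw [if_pos hz, if_pos hz, hset]
      exact ih _ t (by simpa using hj.le)
    · rw [if_neg hz, if_neg hz, hset]

lemma pvMain : ∀ (l : List Char), l ≠ [] → PySem.Chars.strIsalpha l = true →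
    pvIncA l = pvBScan l l.length := by
  intro l
  induction l using List.reverseRecOn with
  | nil => intro h; exact absurd rfl h
  | append_singleton init c ih =>
    intro _ halpha
    have hguard : ¬(init ++ [c] = [] ∨ ¬PySem.Chars.strIsalpha (init ++ [c]) = true) := by
      simp [halpha]
    rw [pvIncA, if_neg hguard]
    have hlast : (PySem.List.pyGet? (init ++ [c]) (-1)).getD 'a' = c := by
      simp [PySem.List.pyGet?_neg_one_append_singleton]
    have hrest : PySem.List.slice (init ++ [c]) none (some (-1)) = init := by
      simp [PySem.List.slice_to_neg_one]
    have hlen : (init ++ [c]).length = init.length + 1 := by simp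
    have hget : (init ++ [c]).getD init.length 'a' = c := by
      simp [List.getD]
    have hset : ∀ d, (init ++ [c]).set init.length d = init ++ [d] := by
      intro d; simp
    rw [hlen]
    by_cases hz : c = 'z'
    · subst hz
      rw [hlast, hrest, if_pos rfl]
      by_cases hinit : init = []
      · subst hinit; decide
      · have hia : PySem.Chars.strIsalpha init = true := by
          simp only [PySem.Chars.strIsalpha, List.all_append, Bool.and_eq_true] at halpha
          simp only [PySem.Chars.strIsalpha, Bool.and_eq_true]
          exact ⟨by simp [hinit], halpha.2.1⟩
        rw [if_pos hinit, ih hinit hia, pvBScan, hget, if_pos rfl, hset 'a']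
        exact (pvBScan_append init.length init ['a'] le_rfl).symm
    · rw [hlast, hrest, if_neg hz, pvBScan, hget, if_neg hz, hset]

-- ===== VERDICT (by name: the statement is the Claim_ definition above) =====
theorem increment_suffix_spec : Claim_equal_increment_suffix := by
  intro suffix _
  unfold Spec_increment_suffix increment_suffix increment_suffix_alt
  by_cases hg : suffix.toList = [] ∨ ¬ PySem.Str.strIsalpha suffix
  · rw [if_pos hg, pvIncA, if_pos (by simpa using hg)]
    rfl
  · have hg' := hg
    rw [not_or, not_not] at hg'
    rw [if_neg hg]
    exact congrArg String.mk
      (pvMain suffix.toList hg'.1 (by simpa using hg'.2))
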